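-- pv_equiv track=rewrite | github.com/seo-dong-hyeon/Algorithm | 프로그래머스/실전모의/1회/2.py | solution
-- ===== SOURCE A (Python) =====
-- def solution(want, number, discount):
--     answer = 0
--     dic_want = {}
--
--     for i in range(len(want)):
--         dic_want[want[i]] = number[i]
--
--     for i in range(len(discount)):
--         dic_discount = {}
--         for j in range(10):
--             if i + j >= len(discount):
--                 continue
--             if discount[i + j] not in dic_discount:
--                 dic_discount[discount[i + j]] = 0
--             dic_discount[discount[i + j]] += 1
--         flag = True
--         for key, value in dic_want.items():
--             if key not in dic_discount or dic_discount[key] < value: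
--                 flag = False
--                 break
--         if flag:
--             answer += 1
--
--     return answer
-- ===== SOURCE B (Python) =====
-- def solution(want, number, discount):
--     # Sliding window over discount with an incrementally maintained
--     # "matched requirements" counter: O(n + len(want)).
--     need = dict(zip(want, number))
--     total = len(need)
--     n = len(discount)
--     cnt = {}
--     matched = 0
--     answer = 0
--
--     def ok(c, v):
--         return c >= 1 and c >= v
--
--     def shift(x, d):
--         nonlocal matched
--         if x in need:
--             c = cnt.get(x, 0)
--             v = need[x]
--             matched += int(ok(c + d, v)) - int(ok(c, v))
--             cnt[x] = c + d
--
--     for j in range(min(10, n)):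
--         shift(discount[j], 1)
--     for i in range(n):
--         if matched == total:
--             answer += 1
--         shift(discount[i], -1)
--         if i + 10 < n:
--             shift(discount[i + 10], 1)
--     return answer
-- ===== Notes on version B (the rewrite author's own statement) =====
-- stated objective: faster
-- what changed: Replaces A's per-day rebuild of a 10-item count dict plus a scan over all requirements (O(n*(10+w))) by a sliding window that updates the counts of the two items entering/leaving and maintains a matched-requirements counter incrementally (O(n+w)).
import Mathlib
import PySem

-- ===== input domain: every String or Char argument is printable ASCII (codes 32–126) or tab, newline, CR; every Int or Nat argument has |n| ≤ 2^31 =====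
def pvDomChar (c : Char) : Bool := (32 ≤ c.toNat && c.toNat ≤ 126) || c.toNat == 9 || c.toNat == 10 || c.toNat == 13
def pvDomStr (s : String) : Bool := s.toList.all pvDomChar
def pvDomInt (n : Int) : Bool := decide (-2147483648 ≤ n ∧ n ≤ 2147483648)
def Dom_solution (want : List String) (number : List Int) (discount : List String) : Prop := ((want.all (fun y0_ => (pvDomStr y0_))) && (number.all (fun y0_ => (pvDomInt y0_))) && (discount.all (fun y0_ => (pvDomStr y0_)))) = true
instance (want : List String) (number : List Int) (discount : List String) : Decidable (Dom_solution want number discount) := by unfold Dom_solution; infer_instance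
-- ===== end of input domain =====

-- B replaces A's per-day rebuild of a 10-item count dictionary by a sliding window with an
-- incrementally maintained matched-requirements counter (objective: faster, O(n+w) vs O(n*(10+w))).

-- ===== PORT A =====
-- dic_want: for i in range(len(want)): dic_want[want[i]] = number[i]
-- (number[i] raises IndexError when len(number) < len(want); Pre_solution excludes that)
def pvBuildWant (want : List String) (number : List Int) : PySem.Dict String Int :=
  (List.range want.length).foldl
    (fun d i => d.insert (want[i]?.getD "") (number[i]?.getD 0)) PySem.Dict.empty

-- dic_discount built over j in range(10), skipping i+j >= len(discount)
def pvBuildWindow (discount : List String) (i : Nat) : PySem.Dict String Int :=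
  (List.range 10).foldl
    (fun d j =>
      if discount.length ≤ i + j then d
      else
        let x := discount[i+j]?.getD ""
        let d1 := if d.contains x then d else d.insert x 0
        d1.insert x (d1.getD x 0 + 1))
    PySem.Dict.empty

-- the flag loop with its break
def pvCheckFlag : List (String × Int) → PySem.Dict String Int → Bool
  | [], _ => true
  | (k, v) :: rest, d =>
      if !d.contains k || d.getD k 0 < v then false else pvCheckFlag rest d

def solution (want : List String) (number : List Int) (discount : List String) : Int :=
  let dicWant := pvBuildWant want number
  (List.range discount.length).foldl
    (fun answer i =>
      if pvCheckFlag dicWant.items (pvBuildWindow discount i) then answer + 1 else answer)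
    0

-- ===== PORT B =====
def pvOk (c v : Int) : Bool := 1 ≤ c && v ≤ c

-- shift(x, d): update the window count of x by d and the matched counter incrementally
def pvShift (need : PySem.Dict String Int) (st : PySem.Dict String Int × Int)
    (x : String) (d : Int) : PySem.Dict String Int × Int :=
  if need.contains x then
    let c := st.1.getD x 0
    let v := need.getD x 0   -- need[x]; the key is present by the guard
    (st.1.insert x (c + d),
     st.2 + (if pvOk (c + d) v then 1 else 0) - (if pvOk c v then 1 else 0))
  else st

def solution_alt (want : List String) (number : List Int) (discount : List String) : Int :=
  let need := (want.zip number).foldl (fun d p => d.insert p.1 p.2) PySem.Dict.empty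
  let total : Int := (need.size : Int)
  let n := discount.length
  let st0 := (List.range (min 10 n)).foldl
    (fun st j => pvShift need st (discount[j]?.getD "") 1) (PySem.Dict.empty, 0)
  let r := (List.range n).foldl
    (fun (p : (PySem.Dict String Int × Int) × Int) i =>
      let ans := if p.1.2 == total then p.2 + 1 else p.2
      let st1 := pvShift need p.1 (discount[i]?.getD "") (-1)
      let st2 := if i + 10 < n then pvShift need st1 (discount[i+10]?.getD "") 1 else st1
      (st2, ans))
    (st0, 0)
  r.2

-- ===== PRECONDITION & SPEC =====
-- Pre_ excludes exactly the inputs where A raises IndexError (number shorter than want).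
def Pre_solution (want : List String) (number : List Int) (discount : List String) : Prop :=
  want.length ≤ number.length
instance (want : List String) (number : List Int) (discount : List String) :
    Decidable (Pre_solution want number discount) := by unfold Pre_solution; infer_instance

def pvWitness_solution : List String × List Int × List String := (["a"], [1], ["a"])

def Spec_solution (want : List String) (number : List Int) (discount : List String) (out : Int) : Prop := out = solution_alt want number discount
instance (want : List String) (number : List Int) (discount : List String) (out : Int) : Decidable (Spec_solution want number discount out) := by unfold Spec_solution; infer_instance

-- ===== CLAIM (what is proved, stated in full; the proofs are below) =====
def Claim_equal_solution : Prop := ∀ (want : List String) (number : List Int) (discount : List String), Dom_solution want number discount → Pre_solution want number discount → Spec_solution want number discount (solution want number discount)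

-- ===== LEMMAS AND PROOFS =====

-- the requirements dictionary both sides work with
def needD (want : List String) (number : List Int) : PySem.Dict String Int :=
  (want.zip number).foldl (fun d p => d.insert p.1 p.2) PySem.Dict.empty

-- count of item k in the 10-day window starting at day i
def wcN (discount : List String) (i : Nat) (k : String) : Nat :=
  ((discount.drop i).take 10).count k

def okP (discount : List String) (i : Nat) (p : String × Int) : Bool :=
  pvOk ((wcN discount i p.1 : Int)) p.2

def goodI (need : PySem.Dict String Int) (discount : List String) (i : Nat) : Bool :=
  need.items.all (okP discount i)


-- A's dic_want fold over indices equals the fold over zip (needs len(want) ≤ len(number))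
theorem buildWant_eq (want : List String) (number : List Int)
    (h : want.length ≤ number.length) :
    pvBuildWant want number = needD want number := by
  unfold pvBuildWant needD
  suffices H : ∀ (xs : List String) (ys : List Int) (d0 : PySem.Dict String Int),
      xs.length ≤ ys.length →
      (List.range xs.length).foldl (fun d i => d.insert (xs[i]?.getD "") (ys[i]?.getD 0)) d0
        = (xs.zip ys).foldl (fun d p => d.insert p.1 p.2) d0 by
    exact H want number _ h
  intro xs
  induction xs with
  | nil => intro ys d0 _; simp
  | cons x xs ih =>
      intro ys d0 hlen
      cases ys with
      | nil => simp at hlen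
      | cons y ys =>
          simp only [List.length_cons, List.range_succ_eq_map, List.foldl_cons, List.foldl_map,
            List.zip_cons_cons]
          simpa using ih ys (d0.insert x y) (by simpa using hlen)

-- one inner-loop step of A's window dict equals the counter step
theorem windowStep_eq (d : PySem.Dict String Int) (x : String) :
    (let d1 := if d.contains x then d else d.insert x 0
     d1.insert x (d1.getD x 0 + 1)) = d.insert x (d.getD x 0 + 1) := by
  by_cases hc : d.contains x = true
  · simp [hc]
  · simp only [Bool.not_eq_true] at hc
    simp only [hc, Bool.false_eq_true, if_false]
    apply PySem.Dict.ext
    rw [PySem.Dict.getD_insert_self, PySem.Dict.getD_of_not_contains d _ hc,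
      PySem.Dict.items_insert_of_contains _ _ (PySem.Dict.contains_insert_self d x 0),
      PySem.Dict.items_insert_of_not_contains d _ hc,
      PySem.Dict.items_insert_of_not_contains d _ hc]
    rw [List.map_append]
    congr 1
    · conv_rhs => rw [← List.map_id d.items]
      apply List.map_congr_left
      intro p hp
      have : p.1 ∈ d.keys := PySem.Dict.mem_keys_of_mem_items d hp
      have hne : ¬ (p.1 == x) = true := by
        intro hbeq
        have : d.contains x = true := by
          rw [PySem.Dict.contains_iff_mem_keys]
          simpa using (eq_of_beq hbeq) ▸ this
        simp [this] at hc
      simp [hne]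
    · simp

-- A's window dict is Counter(discount[i:i+10])
theorem buildWindow_eq (discount : List String) (i : Nat) :
    pvBuildWindow discount i = PySem.Dict.counter ((discount.drop i).take 10) := by
  unfold pvBuildWindow
  rw [← PySem.Dict.foldl_insert_getD_add_one_eq_counter]
  suffices H : ∀ (m : Nat) (d0 : PySem.Dict String Int),
      (List.range m).foldl
        (fun d j =>
          if discount.length ≤ i + j then d
          else
            let x := discount[i+j]?.getD ""
            let d1 := if d.contains x then d else d.insert x 0
            d1.insert x (d1.getD x 0 + 1)) d0
        = ((discount.drop i).take m).foldl (fun d x => d.insert x (d.getD x 0 + 1)) d0 by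
    exact H 10 _
  intro m
  induction m with
  | zero => intro d0; simp
  | succ m ih =>
      intro d0
      rw [List.range_succ, List.foldl_append, ih]
      by_cases hm : discount.length ≤ i + m
      · have hlen : (discount.drop i).length ≤ m := by simp; omega
        rw [List.take_of_length_le hlen, List.take_of_length_le (le_trans hlen (Nat.le_succ m))]
        simp [hm]
      · push_neg at hm
        have h9 : (discount.drop i)[m]? = some discount[i+m] := by
          rw [List.getElem?_drop]
          exact List.getElem?_eq_getElem (by omega)
        rw [List.take_succ, h9]
        simp only [Option.toList_some, List.foldl_append, List.foldl_cons, List.foldl_nil]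
        have : ¬ discount.length ≤ i + m := by omega
        simp only [this, if_false]
        rw [windowStep_eq]
        simp [List.getElem?_eq_getElem (show i + m < discount.length from by omega)]

-- A's flag loop characterized
theorem checkFlag_eq (l : List (String × Int)) (d : PySem.Dict String Int) :
    pvCheckFlag l d = l.all (fun p => d.contains p.1 && !decide (d.getD p.1 0 < p.2)) := by
  induction l with
  | nil => rfl
  | cons p rest ih =>
      obtain ⟨k, v⟩ := p
      by_cases h1 : d.contains k = true <;> by_cases h2 : d.getD k 0 < v <;>
        simp [pvCheckFlag, h1, h2, ih]

theorem solution_char (want : List String) (number : List Int) (discount : List String)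
    (h : want.length ≤ number.length) :
    solution want number discount
      = ((List.range discount.length).countP (goodI (needD want number) discount) : Int) := by
  unfold solution
  rw [buildWant_eq want number h, PySem.List.foldl_if_add_one]
  simp only [zero_add, Nat.cast_inj]
  apply List.countP_congr
  intro i _
  rw [checkFlag_eq, buildWindow_eq]
  unfold goodI
  apply Eq.to_iff
  have hfg : ∀ p : String × Int,
      ((PySem.Dict.counter ((discount.drop i).take 10)).contains p.1 &&
        !decide ((PySem.Dict.counter ((discount.drop i).take 10)).getD p.1 0 < p.2))
      = okP discount i p := by
    intro p
    rw [PySem.Dict.contains_counter, PySem.Dict.getD_counter]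
    unfold okP pvOk wcN
    by_cases h1 : p.1 ∈ (discount.drop i).take 10
    · have hcount : 0 < ((discount.drop i).take 10).count p.1 := List.count_pos_iff.mpr h1
      by_cases h2 : ((((discount.drop i).take 10).count p.1 : Int)) < p.2
      · simp [h1, h2] <;> omega
      · simp [h1, h2] <;> omega
    · have hcount : ((discount.drop i).take 10).count p.1 = 0 := List.count_eq_zero.mpr h1
      simp [h1, hcount]
  rw [funext hfg]


-- ===== B-side lemmas: sliding-window invariant =====

-- changing the predicate at one key of a nodup-keyed association list changes countP by the two indicators
theorem countP_update (l : List (String × Int)) (hnd : (l.map Prod.fst).Nodup)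
    (x : String) (v : Int) (hmem : (x, v) ∈ l) (q q' : String × Int → Bool)
    (hag : ∀ p ∈ l, p.1 ≠ x → q' p = q p)
    (hxv : ∀ p ∈ l, p.1 = x → p = (x, v)) :
    ((l.countP q' : Nat) : Int)
      = (l.countP q : Int) + (if q' (x, v) then 1 else 0) - (if q (x, v) then 1 else 0) := by
  induction l with
  | nil => simp at hmem
  | cons a t ih =>
      rw [List.map_cons, List.nodup_cons] at hnd
      by_cases hax : a.1 = x
      · have ha : a = (x, v) := hxv a (List.mem_cons_self ..) hax
        have ht : List.countP q' t = List.countP q t := by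
          apply List.countP_congr
          intro p hp
          have hpx : p.1 ≠ x := by
            intro he
            exact hnd.1 (hax ▸ he ▸ List.mem_map_of_mem (f := Prod.fst) hp)
          rw [hag p (List.mem_cons_of_mem _ hp) hpx]
        rw [List.countP_cons, List.countP_cons, ht, ha]
        push_cast
        split_ifs <;> omega
      · have hmemt : (x, v) ∈ t := by
          rcases List.mem_cons.mp hmem with h | h
          · exact absurd (congrArg Prod.fst h.symm) hax
          · exact h
        have haq : q' a = q a := hag a (List.mem_cons_self ..) hax
        have := ih hnd.2 hmemt
          (fun p hp h1 => hag p (List.mem_cons_of_mem _ hp) h1)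
          (fun p hp h1 => hxv p (List.mem_cons_of_mem _ hp) h1)
        rw [List.countP_cons, List.countP_cons, haq]
        push_cast at this ⊢
        split_ifs at this ⊢ <;> omega

-- one shift(x, d) step preserves the two components of the window invariant
theorem pvShift_spec (need : PySem.Dict String Int) (hnd : need.keys.Nodup)
    (cnt : PySem.Dict String Int) (matched : Int) (x : String) (d : Int) (f : String → Int)
    (hc : ∀ k, need.contains k = true → cnt.getD k 0 = f k)
    (hm : matched = ((need.items.countP (fun p => pvOk (f p.1) p.2) : Nat) : Int)) :
    (∀ k, need.contains k = true →
        (pvShift need (cnt, matched) x d).1.getD k 0 = f k + (if k = x then d else 0)) ∧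
    (pvShift need (cnt, matched) x d).2
      = ((need.items.countP
            (fun p => pvOk (f p.1 + (if p.1 = x then d else 0)) p.2) : Nat) : Int) := by
  have hnd' : (need.items.map Prod.fst).Nodup := by
    simpa [PySem.Dict.keys] using hnd
  by_cases hx : need.contains x = true
  · obtain ⟨v, hv⟩ : ∃ v, (x, v) ∈ need.items := by
      have hxk : x ∈ need.keys := (PySem.Dict.contains_iff_mem_keys need x).mp hx
      simp only [PySem.Dict.keys, List.mem_map] at hxk
      obtain ⟨p, hp, hpx⟩ := hxk
      exact ⟨p.2, by rw [← hpx]; simpa using hp⟩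
    have hget : need.get? x = some v := PySem.Dict.get?_of_mem_items need hv hnd
    have hgetD : need.getD x 0 = v := by
      rw [PySem.Dict.getD_eq_get?_getD, hget]; rfl
    have hxv : ∀ p ∈ need.items, p.1 = x → p = (x, v) := by
      intro p hp hpx
      have : need.get? x = some p.2 :=
        PySem.Dict.get?_of_mem_items need (by rw [← hpx]; simpa using hp) hnd
      have hv2 : p.2 = v := by rw [this] at hget; exact (Option.some_inj.mp hget)
      rw [← hpx, ← hv2]
    constructor
    · intro k hk
      simp only [pvShift, hx, if_true]
      by_cases hkx : k = x
      · subst hkx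
        rw [PySem.Dict.getD_insert_self, hc k hk]
        simp
      · rw [PySem.Dict.getD_insert_of_ne _ _ _ hkx, hc k hk]
        simp [hkx]
    · simp only [pvShift, hx, if_true]
      have key := countP_update need.items hnd' x v hv
        (fun p => pvOk (f p.1) p.2)
        (fun p => pvOk (f p.1 + (if p.1 = x then d else 0)) p.2)
        (fun p _ h1 => by simp [h1])
        hxv
      rw [hm, hc x hx, hgetD, key]
      dsimp only
      split_ifs <;> simp_all <;> omega
  · have hxf : need.contains x = false := by
      cases h : need.contains x
      · rfl
      · exact absurd h hx
    have hid : pvShift need (cnt, matched) x d = (cnt, matched) := by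
      simp [pvShift, hxf]
    rw [hid]
    constructor
    · intro k hk
      have hkx : k ≠ x := fun he => hx (he ▸ hk)
      rw [hc k hk]
      simp [hkx]
    · rw [hm]
      have : need.items.countP (fun p => pvOk (f p.1 + (if p.1 = x then d else 0)) p.2)
          = need.items.countP (fun p => pvOk (f p.1) p.2) := by
        apply List.countP_congr
        intro p hp
        have hpk : need.contains p.1 = true := by
          rw [PySem.Dict.contains_iff_mem_keys]
          exact PySem.Dict.mem_keys_of_mem_items need hp
        have hpx : p.1 ≠ x := fun he => hx (he ▸ hpk)
        simp [hpx]
      rw [this]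

theorem needD_nodup (want : List String) (number : List Int) :
    (needD want number).keys.Nodup := by
  unfold needD
  exact PySem.Dict.nodup_keys_foldl_insert_key _ _ _ _ PySem.Dict.nodup_keys_empty

-- count of k in the window [a, a+m+1) splits off day a
theorem count_shift (discount : List String) (a : Nat) (ha : a < discount.length)
    (m : Nat) (k : String) :
    (((discount.drop a).take (m+1)).count k : Int)
      = (if k = discount[a] then 1 else 0) + (((discount.drop (a+1)).take m).count k : Int) := by
  rw [List.drop_eq_getElem_cons ha, List.take_succ_cons, List.count_cons]
  by_cases hk : k = discount[a]
  · simp [hk]; omega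
  · have hk2 : ¬ (discount[a] = k) := fun h => hk h.symm
    simp [hk, hk2]

-- the initial fill of the first window
theorem initFold (need : PySem.Dict String Int) (hnd : need.keys.Nodup)
    (discount : List String) (m : Nat) :
    ∀ (a : Nat) (cnt : PySem.Dict String Int) (matched : Int) (f : String → Int),
      a + m ≤ discount.length →
      (∀ k, need.contains k = true → cnt.getD k 0 = f k) →
      matched = ((need.items.countP (fun p => pvOk (f p.1) p.2) : Nat) : Int) →
      (∀ k, need.contains k = true →
        ((List.range' a m).foldl (fun st j => pvShift need st (discount[j]?.getD "") 1)
            (cnt, matched)).1.getD k 0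
          = f k + (((discount.drop a).take m).count k : Int)) ∧
      ((List.range' a m).foldl (fun st j => pvShift need st (discount[j]?.getD "") 1)
          (cnt, matched)).2
        = ((need.items.countP
              (fun p => pvOk (f p.1 + (((discount.drop a).take m).count p.1 : Int)) p.2)
              : Nat) : Int) := by
  induction m with
  | zero =>
      intro a cnt matched f _ hc hm
      constructor
      · intro k hk
        simpa using hc k hk
      · simpa using hm
  | succ m ih =>
      intro a cnt matched f hlen hc hm
      have ha : a < discount.length := by omega
      rw [List.range'_succ, List.foldl_cons]
      obtain ⟨hc1, hm1⟩ := pvShift_spec need hnd cnt matched (discount[a]?.getD "") 1 f hc hm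
      have hx : discount[a]?.getD "" = discount[a] := by
        rw [List.getElem?_eq_getElem ha]; rfl
      have hcombine : ∀ k, f k + (if k = discount[a]?.getD "" then (1:Int) else 0)
          + (((discount.drop (a+1)).take m).count k : Int)
          = f k + (((discount.drop a).take (m+1)).count k : Int) := by
        intro k
        rw [count_shift discount a ha m k, hx]
        split_ifs <;> omega
      have hst : pvShift need (cnt, matched) (discount[a]?.getD "") 1
          = ((pvShift need (cnt, matched) (discount[a]?.getD "") 1).1,
             (pvShift need (cnt, matched) (discount[a]?.getD "") 1).2) := rfl
      rw [hst]
      obtain ⟨ihc, ihm⟩ := ih (a+1)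
        (pvShift need (cnt, matched) (discount[a]?.getD "") 1).1
        (pvShift need (cnt, matched) (discount[a]?.getD "") 1).2
        (fun k => f k + (if k = discount[a]?.getD "" then 1 else 0))
        (by omega) hc1 hm1
      constructor
      · intro k hk
        rw [ihc k hk]
        exact hcombine k
      · rw [ihm]
        simp only [hcombine]


-- how the window count changes from day i to day i+1
theorem wcN_succ (discount : List String) (i : Nat) (hi : i < discount.length) (k : String) :
    (wcN discount (i+1) k : Int)
      = (wcN discount i k : Int) - (if k = discount[i]?.getD "" then 1 else 0)
        + (if i + 10 < discount.length
            then (if k = discount[i+10]?.getD "" then 1 else 0) else 0) := by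
  have hx : discount[i]?.getD "" = discount[i] := by
    rw [List.getElem?_eq_getElem hi]; rfl
  have h1 := count_shift discount i hi 9 k
  have hidx : i + 1 + 9 = i + 10 := by omega
  have h2 : ((discount.drop (i+1)).take 10)
      = ((discount.drop (i+1)).take 9) ++ (discount[i+10]?.toList) := by
    rw [show (10:Nat) = 9 + 1 from rfl, List.take_succ, List.getElem?_drop, hidx]
  unfold wcN
  rw [show (9:Nat) + 1 = 10 from rfl] at h1
  rw [h2, List.count_append, hx]
  by_cases h3 : i + 10 < discount.length
  · rw [List.getElem?_eq_getElem h3]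
    simp only [Option.toList_some, Option.getD_some, h3, if_true]
    have hsing : ((List.count k [discount[i+10]] : Nat) : Int)
        = (if k = discount[i+10] then 1 else 0) := by
      by_cases hk : k = discount[i+10]
      · simp [hk]
      · have h' : ¬ (discount[i+10] = k) := fun h => hk h.symm
        simp [hk, h']
    push_cast
    push_cast at h1 hsing
    rw [hsing]
    split_ifs at h1 ⊢ <;> omega
  · have hn : discount[i+10]? = none := List.getElem?_eq_none (by omega)
    rw [hn]
    simp only [Option.toList_none, List.count_nil, h3, if_false]
    push_cast
    push_cast at h1
    split_ifs at h1 ⊢ <;> omega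

-- the matched == total test decides the window predicate
theorem flag_eq (need : PySem.Dict String Int) (hnd : need.keys.Nodup)
    (discount : List String) (i : Nat) :
    ((((need.items.countP (okP discount i) : Nat) : Int)) == ((need.size : Nat) : Int))
      = goodI need discount i := by
  unfold goodI
  have hsize : need.size = need.items.length := rfl
  by_cases hg : need.items.all (okP discount i) = true
  · have : need.items.countP (okP discount i) = need.items.length :=
      List.countP_eq_length.mpr (by simpa [List.all_eq_true] using hg)
    simp [hg, this, hsize]
  · have hne : need.items.countP (okP discount i) ≠ need.items.length := by
      intro he
      exact hg (by
        simp only [List.all_eq_true]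
        exact List.countP_eq_length.mp he)
    have : ¬ (((need.items.countP (okP discount i) : Nat) : Int) = ((need.items.length : Nat) : Int)) := by
      exact_mod_cast hne
    simp [hsize, this, hg]

-- the main sliding loop counts the good days
theorem mainLoop (need : PySem.Dict String Int) (hnd : need.keys.Nodup)
    (discount : List String) (m : Nat) :
    ∀ (i : Nat) (cnt : PySem.Dict String Int) (matched ans : Int),
      i + m = discount.length →
      (∀ k, need.contains k = true → cnt.getD k 0 = (wcN discount i k : Int)) →
      matched = ((need.items.countP (okP discount i) : Nat) : Int) →
      ((List.range' i m).foldl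
          (fun (p : (PySem.Dict String Int × Int) × Int) j =>
            let ans := if p.1.2 == ((need.size : Nat) : Int) then p.2 + 1 else p.2
            let st1 := pvShift need p.1 (discount[j]?.getD "") (-1)
            let st2 := if j + 10 < discount.length
              then pvShift need st1 (discount[j+10]?.getD "") 1 else st1
            (st2, ans))
          ((cnt, matched), ans)).2
        = ans + (((List.range' i m).countP (goodI need discount) : Nat) : Int) := by
  induction m with
  | zero =>
      intro i cnt matched ans _ _ _
      simp
  | succ m ih =>
      intro i cnt matched ans hlen hc hm
      have hi : i < discount.length := by omega
      rw [List.range'_succ, List.foldl_cons, List.countP_cons]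
      dsimp only
      obtain ⟨hc1, hm1⟩ := pvShift_spec need hnd cnt matched (discount[i]?.getD "") (-1)
        (fun k => (wcN discount i k : Int)) hc hm
      -- state after the removal shift
      set st1 := pvShift need (cnt, matched) (discount[i]?.getD "") (-1) with hst1
      have hflag : (matched == ((need.size : Nat) : Int)) = goodI need discount i := by
        rw [hm]; exact flag_eq need hnd discount i
      by_cases h10 : i + 10 < discount.length
      · obtain ⟨hc2, hm2⟩ := pvShift_spec need hnd st1.1 st1.2 (discount[i+10]?.getD "") 1
          (fun k => (wcN discount i k : Int) + (if k = discount[i]?.getD "" then (-1) else 0))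
          (by intro k hk; exact hc1 k hk) hm1
        set st2 := pvShift need st1 (discount[i+10]?.getD "") 1 with hst2
        have hwc : ∀ k, (wcN discount i k : Int) + (if k = discount[i]?.getD "" then (-1) else 0)
            + (if k = discount[i+10]?.getD "" then (1:Int) else 0) = (wcN discount (i+1) k : Int) := by
          intro k
          rw [wcN_succ discount i hi k]
          simp only [h10, if_true]
          split_ifs <;> omega
        have hc' : ∀ k, need.contains k = true → st2.1.getD k 0 = (wcN discount (i+1) k : Int) := by
          intro k hk
          rw [hst2, show st1 = (st1.1, st1.2) from rfl]
          rw [hc2 k hk]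
          exact hwc k
        have hm' : st2.2 = ((need.items.countP (okP discount (i+1)) : Nat) : Int) := by
          rw [hst2, show st1 = (st1.1, st1.2) from rfl, hm2]
          congr 1
          apply List.countP_congr
          intro p _
          apply Eq.to_iff
          unfold okP
          rw [← hwc p.1]
        have := ih (i+1) st2.1 st2.2
          (if matched == ((need.size : Nat) : Int) then ans + 1 else ans)
          (by omega) hc' hm'
        rw [show st2 = (st2.1, st2.2) from rfl] at *
        simp only [h10, if_true]
        rw [this, hflag]
        by_cases hg : goodI need discount i = true <;> simp [hg] <;> push_cast <;> omega
      · have hwc : ∀ k, (wcN discount i k : Int) + (if k = discount[i]?.getD "" then (-1:Int) else 0)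
            = (wcN discount (i+1) k : Int) := by
          intro k
          rw [wcN_succ discount i hi k]
          simp only [h10, if_false]
          split_ifs <;> omega
        have hc' : ∀ k, need.contains k = true → st1.1.getD k 0 = (wcN discount (i+1) k : Int) := by
          intro k hk
          rw [hc1 k hk]
          exact hwc k
        have hm' : st1.2 = ((need.items.countP (okP discount (i+1)) : Nat) : Int) := by
          rw [hm1]
          congr 1
          apply List.countP_congr
          intro p _
          apply Eq.to_iff
          unfold okP
          rw [← hwc p.1]
        have := ih (i+1) st1.1 st1.2
          (if matched == ((need.size : Nat) : Int) then ans + 1 else ans)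
          (by omega) hc' hm'
        rw [show st1 = (st1.1, st1.2) from rfl] at this
        simp only [h10, if_false]
        rw [this, hflag]
        by_cases hg : goodI need discount i = true <;> simp [hg] <;> push_cast <;> omega

theorem solution_alt_char (want : List String) (number : List Int) (discount : List String) :
    solution_alt want number discount
      = ((List.range discount.length).countP (goodI (needD want number) discount) : Int) := by
  have hnd : (needD want number).keys.Nodup := needD_nodup want number
  have e1 : solution_alt want number discount
      = ((List.range discount.length).foldl
          (fun (p : (PySem.Dict String Int × Int) × Int) j =>
            let ans := if p.1.2 == (((needD want number).size : Nat) : Int) then p.2 + 1 else p.2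
            let st1 := pvShift (needD want number) p.1 (discount[j]?.getD "") (-1)
            let st2 := if j + 10 < discount.length
              then pvShift (needD want number) st1 (discount[j+10]?.getD "") 1 else st1
            (st2, ans))
          (((List.range (min 10 discount.length)).foldl
              (fun st j => pvShift (needD want number) st (discount[j]?.getD "") 1)
              (PySem.Dict.empty, 0)), 0)).2 := rfl
  rw [e1]
  simp only [List.range_eq_range']
  obtain ⟨hc0, hm0⟩ := initFold (needD want number) hnd discount (min 10 discount.length) 0
    PySem.Dict.empty 0 (fun _ => (0:Int)) (by omega)
    (fun k _ => by simp) (by simp [pvOk])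
  have htake : (discount.drop 0).take (min 10 discount.length) = (discount.drop 0).take 10 := by
    rcases le_total 10 discount.length with h | h
    · rw [Nat.min_eq_left h]
    · rw [Nat.min_eq_right h]
      rw [List.drop_zero, List.take_length, List.take_of_length_le h]
  have hc0' : ∀ k, (needD want number).contains k = true →
      ((List.range' 0 (min 10 discount.length)).foldl
          (fun st j => pvShift (needD want number) st (discount[j]?.getD "") 1)
          (PySem.Dict.empty, 0)).1.getD k 0 = (wcN discount 0 k : Int) := by
    intro k hk
    rw [hc0 k hk, htake]
    unfold wcN
    simp
  have hm0' : ((List.range' 0 (min 10 discount.length)).foldl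
          (fun st j => pvShift (needD want number) st (discount[j]?.getD "") 1)
          (PySem.Dict.empty, 0)).2
      = (((needD want number).items.countP (okP discount 0) : Nat) : Int) := by
    rw [hm0]
    congr 1
    apply List.countP_congr
    intro p _
    apply Eq.to_iff
    rw [htake]
    unfold okP wcN
    simp
  have hmain := mainLoop (needD want number) hnd discount discount.length 0
    ((List.range' 0 (min 10 discount.length)).foldl
        (fun st j => pvShift (needD want number) st (discount[j]?.getD "") 1)
        (PySem.Dict.empty, 0)).1
    ((List.range' 0 (min 10 discount.length)).foldl
        (fun st j => pvShift (needD want number) st (discount[j]?.getD "") 1)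
        (PySem.Dict.empty, 0)).2
    0 (by omega) hc0' hm0'
  rw [show ((List.range' 0 (min 10 discount.length)).foldl
        (fun st j => pvShift (needD want number) st (discount[j]?.getD "") 1)
        (PySem.Dict.empty, 0))
      = (((List.range' 0 (min 10 discount.length)).foldl
        (fun st j => pvShift (needD want number) st (discount[j]?.getD "") 1)
        (PySem.Dict.empty, 0)).1,
        ((List.range' 0 (min 10 discount.length)).foldl
        (fun st j => pvShift (needD want number) st (discount[j]?.getD "") 1)
        (PySem.Dict.empty, 0)).2) from rfl]
  rw [hmain]
  simp

-- ===== VERDICT (by name: the statement is the Claim_ definition above) =====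
theorem solution_spec : Claim_equal_solution := by
  intro want number discount _ hpre
  unfold Spec_solution
  rw [solution_char want number discount hpre, solution_alt_char]
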